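-- pv_equiv track=rewrite | github.com/afengbo/bigdata_code | code2/sentence_to_vector.py | word_to_vector
-- ===== SOURCE A (Python) =====
-- def word_to_vector(word_dict, word_list):
--     """
--     将关键词转化成向量值（词频向量化）
--     :param word_dict: {关键词:序号}
--     :param word_list: 关键词list
--     :return: 向量list
--     """
--     word_count = dict()
--     # 限定向量长度
--     s_vector = [0] * len(word_dict)
--     # 计算词频
--     for word in word_list:
--         if not word_count.get(word):
--             word_count[word] = 1
--         else:
--             word_count[word] += 1
--     # 将词频对应到向量中
--     for word, frequency in word_count.items():
--         wid = word_dict[word]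
--         s_vector[wid] = frequency
--     return s_vector
-- ===== SOURCE B (Python) =====
-- def word_to_vector(word_dict, word_list):
--     """
--     将关键词转化成向量值（词频向量化）
--     :param word_dict: {关键词:序号}
--     :param word_list: 关键词list
--     :return: 向量list
--     """
--     s_vector = [0] * len(word_dict)
--     for word in word_list:
--         s_vector[word_dict[word]] += 1
--     return s_vector
-- ===== Notes on version B (the rewrite author's own statement) =====
-- stated objective: simpler
-- what changed: B drops A's intermediate word_count dictionary entirely: one pass over word_list increments the vector slot directly, instead of building a frequency table and then iterating its items to write the vector.
-- outside the precondition, e.g. on word_to_vector({'a': 0, 'b': 0}, ['a', 'b']): A returns [1, 0], B returns [2, 0]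
import Mathlib
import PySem

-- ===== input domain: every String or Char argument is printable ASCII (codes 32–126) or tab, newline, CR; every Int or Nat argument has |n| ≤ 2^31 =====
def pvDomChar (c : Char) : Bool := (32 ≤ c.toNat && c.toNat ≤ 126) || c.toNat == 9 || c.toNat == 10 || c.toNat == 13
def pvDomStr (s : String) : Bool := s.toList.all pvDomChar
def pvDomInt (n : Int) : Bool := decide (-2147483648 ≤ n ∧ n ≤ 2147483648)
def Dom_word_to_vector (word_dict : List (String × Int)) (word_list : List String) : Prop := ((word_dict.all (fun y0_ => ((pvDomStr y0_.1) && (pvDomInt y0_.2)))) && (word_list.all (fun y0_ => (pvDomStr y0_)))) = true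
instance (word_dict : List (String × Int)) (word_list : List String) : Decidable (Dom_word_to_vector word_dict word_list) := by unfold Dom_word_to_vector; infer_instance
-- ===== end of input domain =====

-- B removes A's intermediate word-count dictionary: a single pass over word_list increments the
-- vector slot directly (objective: simpler).


-- ===== PORT A =====
def word_to_vector (word_dict : List (String × Int)) (word_list : List String) : List Int :=
  -- word_count = dict(); for word in word_list: if not word_count.get(word): … else: …
  let word_count : PySem.Dict String Int :=
    word_list.foldl
      (fun d w =>
        if PySem.Dict.getD d w 0 == 0 then PySem.Dict.insert d w 1
        else PySem.Dict.insert d w (PySem.Dict.getD d w 0 + 1))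
      PySem.Dict.empty
  -- s_vector = [0] * len(word_dict); for word, frequency in word_count.items(): s_vector[word_dict[word]] = frequency
  (PySem.Dict.items word_count).foldl
    (fun v p => PySem.List.pySetD v (PySem.Dict.getD ⟨word_dict⟩ p.1 0) p.2)
    (List.replicate (PySem.Dict.size ⟨word_dict⟩) 0)

-- ===== PORT B =====
def word_to_vector_alt (word_dict : List (String × Int)) (word_list : List String) : List Int :=
  -- s_vector = [0] * len(word_dict); for word in word_list: s_vector[word_dict[word]] += 1
  word_list.foldl
    (fun v w =>
      PySem.List.pySetD v (PySem.Dict.getD ⟨word_dict⟩ w 0)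
        (PySem.List.pyGetD v (PySem.Dict.getD ⟨word_dict⟩ w 0) 0 + 1))
    (List.replicate (PySem.Dict.size ⟨word_dict⟩) 0)

-- ===== PRECONDITION & SPEC =====
-- the slot of the vector that Python index i addresses in a vector of length n (negative i wraps)
def pvSlot (n : Nat) (i : Int) : Nat := if 0 ≤ i then i.toNat else n - (-i).toNat

-- the index word_dict assigns to w (first match; only meaningful when w is a key)
def pvWid (word_dict : List (String × Int)) (w : String) : Int := PySem.Dict.getD ⟨word_dict⟩ w 0

-- Pre_ excludes (a) word_list words missing from word_dict (A raises KeyError), (b) assigned indices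
-- outside [-len, len) (A raises IndexError), and (c) inputs where two DISTINCT words of word_list are
-- mapped to the SAME vector slot — a degenerate dict on which A's last-write-wins overwrite and B's
-- summed count are both accidental choices.
def Pre_word_to_vector (word_dict : List (String × Int)) (word_list : List String) : Prop :=
  (∀ w ∈ word_list, PySem.Dict.contains (⟨word_dict⟩ : PySem.Dict String Int) w = true ∧
      PySem.Raise.InRange (PySem.Dict.size (⟨word_dict⟩ : PySem.Dict String Int)) (pvWid word_dict w)) ∧
  (∀ w ∈ word_list, ∀ w' ∈ word_list,
      pvSlot (PySem.Dict.size (⟨word_dict⟩ : PySem.Dict String Int)) (pvWid word_dict w) =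
        pvSlot (PySem.Dict.size (⟨word_dict⟩ : PySem.Dict String Int)) (pvWid word_dict w') → w = w')

instance (word_dict : List (String × Int)) (word_list : List String) : Decidable (Pre_word_to_vector word_dict word_list) := by unfold Pre_word_to_vector; infer_instance

def pvWitness_word_to_vector : (List (String × Int)) × List String :=
  ([("a", 0), ("b", 1)], ["a", "b", "a"])

def Spec_word_to_vector (word_dict : List (String × Int)) (word_list : List String) (out : List Int) : Prop := out = word_to_vector_alt word_dict word_list
instance (word_dict : List (String × Int)) (word_list : List String) (out : List Int) : Decidable (Spec_word_to_vector word_dict word_list out) := by unfold Spec_word_to_vector; infer_instance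

-- ===== CLAIM (what is proved, stated in full; the proofs are below) =====
def Claim_equal_word_to_vector : Prop := ∀ (word_dict : List (String × Int)) (word_list : List String), Dom_word_to_vector word_dict word_list → Pre_word_to_vector word_dict word_list → Spec_word_to_vector word_dict word_list (word_to_vector word_dict word_list)

-- ===== LEMMAS AND PROOFS =====

theorem pvSlot_lt {n : Nat} {i : Int} (h : PySem.Raise.InRange n i) : pvSlot n i < n := by
  obtain ⟨h1, h2⟩ := h
  unfold pvSlot
  split <;> omega

theorem pySetD_slot (xs : List Int) (i : Int) (v : Int)
    (h : PySem.Raise.InRange xs.length i) :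
    PySem.List.pySetD xs i v = xs.set (pvSlot xs.length i) v := by
  obtain ⟨h1, h2⟩ := h
  by_cases h0 : 0 ≤ i <;>
    simp [PySem.List.pySetD, PySem.List.pySet?, PySem.List.pyIdx?, pvSlot, h0, h1, h2]

theorem pyGetD_slot (xs : List Int) (i : Int) (d : Int)
    (h : PySem.Raise.InRange xs.length i) :
    PySem.List.pyGetD xs i d = xs.getD (pvSlot xs.length i) d := by
  obtain ⟨h1, h2⟩ := h
  by_cases h0 : 0 ≤ i <;>
    simp [PySem.List.pyGetD, PySem.List.pyGet?, PySem.List.pyIdx?, pvSlot, h0, h1, h2,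
      List.getD_eq_getElem?_getD]

theorem getD_set_int (xs : List Int) (k j : Nat) (a : Int) (hk : k < xs.length) :
    (xs.set k a).getD j 0 = if j = k then a else xs.getD j 0 := by
  simp only [List.getD_eq_getElem?_getD, List.getElem?_set]
  by_cases h : j = k
  · simp [h, hk]
  · have h' : ¬ k = j := fun hh => h hh.symm
    simp [h, h']

-- B's loop: final slot j holds the initial value plus the number of words whose slot is j
theorem foldB_char (wd : List (String × Int)) (n : Nat) (l : List String) (v : List Int)
    (hlen : v.length = n)
    (hl : ∀ w ∈ l, PySem.Raise.InRange n (pvWid wd w)) :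
    (l.foldl
        (fun v w =>
          PySem.List.pySetD v (PySem.Dict.getD ⟨wd⟩ w 0)
            (PySem.List.pyGetD v (PySem.Dict.getD ⟨wd⟩ w 0) 0 + 1)) v).length = n ∧
    ∀ j : Nat,
      (l.foldl
          (fun v w =>
            PySem.List.pySetD v (PySem.Dict.getD ⟨wd⟩ w 0)
              (PySem.List.pyGetD v (PySem.Dict.getD ⟨wd⟩ w 0) 0 + 1)) v).getD j 0 =
        v.getD j 0 + (l.countP (fun w => pvSlot n (pvWid wd w) == j) : Int) := by
  induction l generalizing v with
  | nil => simpa using hlen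
  | cons w l ih =>
    have hw : PySem.Raise.InRange n (pvWid wd w) := hl w (by simp)
    have hw' : PySem.Raise.InRange v.length (pvWid wd w) := hlen ▸ hw
    have hk : pvSlot n (pvWid wd w) < n := pvSlot_lt hw
    simp only [List.foldl_cons]
    have hset : PySem.List.pySetD v (PySem.Dict.getD ⟨wd⟩ w 0)
        (PySem.List.pyGetD v (PySem.Dict.getD ⟨wd⟩ w 0) 0 + 1) =
        v.set (pvSlot n (pvWid wd w)) (v.getD (pvSlot n (pvWid wd w)) 0 + 1) := by
      rw [show PySem.Dict.getD (⟨wd⟩ : PySem.Dict String Int) w 0 = pvWid wd w from rfl,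
        pyGetD_slot v _ 0 hw', pySetD_slot v _ _ hw', hlen]
    rw [hset]
    obtain ⟨ihlen, ihval⟩ := ih (v.set (pvSlot n (pvWid wd w)) (v.getD (pvSlot n (pvWid wd w)) 0 + 1))
      (by simpa using hlen) (fun x hx => hl x (by simp [hx]))
    refine ⟨ihlen, fun j => ?_⟩
    rw [ihval j, getD_set_int v _ j _ (hlen ▸ hk), List.countP_cons]
    by_cases hj : j = pvSlot n (pvWid wd w)
    · simp [hj]; ring
    · have hne : ¬pvSlot n (pvWid wd w) = j := fun hh => hj hh.symm
      simp [hj, hne]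

-- A's write-back loop under pairwise-distinct slots: slot j holds the frequency of the
-- (unique) pair addressing j, otherwise the initial value
theorem foldA_char (wd : List (String × Int)) (n : Nat) (ps : List (String × Int)) (v : List Int)
    (hlen : v.length = n)
    (hp : ∀ p ∈ ps, PySem.Raise.InRange n (pvWid wd p.1))
    (hnd : (ps.map (fun p => pvSlot n (pvWid wd p.1))).Nodup) :
    (ps.foldl (fun v p => PySem.List.pySetD v (PySem.Dict.getD ⟨wd⟩ p.1 0) p.2) v).length = n ∧
    ∀ j : Nat,
      (ps.foldl (fun v p => PySem.List.pySetD v (PySem.Dict.getD ⟨wd⟩ p.1 0) p.2) v).getD j 0 =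
        (match ps.find? (fun p => pvSlot n (pvWid wd p.1) == j) with
          | some p => p.2
          | none => v.getD j 0) := by
  induction ps generalizing v with
  | nil => simpa using hlen
  | cons p ps ih =>
    have hw : PySem.Raise.InRange n (pvWid wd p.1) := hp p (by simp)
    have hw' : PySem.Raise.InRange v.length (pvWid wd p.1) := hlen ▸ hw
    have hk : pvSlot n (pvWid wd p.1) < n := pvSlot_lt hw
    simp only [List.foldl_cons]
    have hset : PySem.List.pySetD v (PySem.Dict.getD ⟨wd⟩ p.1 0) p.2 =
        v.set (pvSlot n (pvWid wd p.1)) p.2 := by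
      rw [show PySem.Dict.getD (⟨wd⟩ : PySem.Dict String Int) p.1 0 = pvWid wd p.1 from rfl,
        pySetD_slot v _ _ hw', hlen]
    rw [hset]
    have hnotin : ∀ q ∈ ps, pvSlot n (pvWid wd q.1) ≠ pvSlot n (pvWid wd p.1) := by
      intro q hq heq
      have hm : pvSlot n (pvWid wd p.1) ∈ ps.map (fun q => pvSlot n (pvWid wd q.1)) := by
        rw [← heq]; exact List.mem_map_of_mem hq
      exact (List.nodup_cons.mp hnd).1 hm
    obtain ⟨ihlen, ihval⟩ := ih (v.set (pvSlot n (pvWid wd p.1)) p.2)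
      (by simpa using hlen) (fun q hq => hp q (by simp [hq])) (List.nodup_cons.mp hnd).2
    refine ⟨ihlen, fun j => ?_⟩
    rw [ihval j, List.find?_cons]
    by_cases hj : pvSlot n (pvWid wd p.1) = j
    · have hfind : ps.find? (fun q => pvSlot n (pvWid wd q.1) == j) = none := by
        rw [List.find?_eq_none]
        intro q hq
        simp only [beq_iff_eq]
        exact fun hh => hnotin q hq (hh.trans hj.symm)
      have hjv : j < v.length := by rw [hlen]; exact hj ▸ hk
      simp [hj, hfind, hjv]
    · have hpf : (pvSlot n (pvWid wd p.1) == j) = false := by simp [hj]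
      simp only [hpf]
      cases hfind : ps.find? (fun q => pvSlot n (pvWid wd q.1) == j) with
      | some q => simp
      | none => simp [hj]

-- A's counting loop builds exactly Counter(word_list)
theorem buildA_eq_counter (word_list : List String) :
    word_list.foldl
      (fun d w =>
        if PySem.Dict.getD d w 0 == 0 then PySem.Dict.insert d w 1
        else PySem.Dict.insert d w (PySem.Dict.getD d w 0 + 1))
      PySem.Dict.empty = PySem.Dict.counter word_list := by
  rw [← PySem.Dict.foldl_insert_getD_add_one_eq_counter]
  apply PySem.List.foldl_congr_mem
  intro d w _
  by_cases h : PySem.Dict.getD d w 0 = 0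
  · simp [h]
  · simp [h]

-- ===== VERDICT (by name: the statement is the Claim_ definition above) =====
theorem word_to_vector_spec : Claim_equal_word_to_vector := by
  intro word_dict word_list _hdom hpre
  obtain ⟨hin, hinj⟩ := hpre
  unfold Spec_word_to_vector
  simp only [word_to_vector, word_to_vector_alt]
  set n := PySem.Dict.size (⟨word_dict⟩ : PySem.Dict String Int) with hn
  rw [buildA_eq_counter, PySem.Dict.items_counter]
  have hmemS : ∀ w ∈ PySem.Set.ofList word_list, w ∈ word_list := by
    intro w hw; exact (PySem.Set.mem_ofList word_list w).mp hw
  -- A side characterization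
  have hA := foldA_char word_dict n
      ((PySem.Set.ofList word_list).map (fun k => (k, (word_list.count k : Int))))
      (List.replicate n 0) (by simp)
      (by
        intro p hp
        obtain ⟨w, hw, rfl⟩ := List.mem_map.mp hp
        exact (hin w (hmemS w hw)).2)
      (by
        rw [List.map_map]
        refine List.Nodup.map_on ?_ (PySem.Set.nodup_ofList word_list)
        intro x hx y hy hxy
        exact hinj x (hmemS x hx) y (hmemS y hy) hxy)
  -- B side characterization
  have hB := foldB_char word_dict n word_list (List.replicate n 0) (by simp)
      (fun w hw => (hin w hw).2)
  obtain ⟨hAl, hAv⟩ := hA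
  obtain ⟨hBl, hBv⟩ := hB
  apply List.ext_getElem (hAl.trans hBl.symm)
  intro j hj1 hj2
  have hjn : j < n := hAl ▸ hj1
  have hgA := hAv j
  have hgB := hBv j
  rw [List.getD_eq_getElem _ _ hj1] at hgA
  rw [List.getD_eq_getElem _ _ hj2] at hgB
  rw [hgA, hgB]
  rw [List.find?_map]
  by_cases hex : ∃ w ∈ word_list, pvSlot n (pvWid word_dict w) = j
  · obtain ⟨w0, hw0, hs0⟩ := hex
    have hw0S : w0 ∈ PySem.Set.ofList word_list := (PySem.Set.mem_ofList word_list w0).mpr hw0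
    have hsome : ((PySem.Set.ofList word_list).find?
        ((fun p => pvSlot n (pvWid word_dict p.1) == j) ∘ (fun k => (k, (word_list.count k : Int))))).isSome := by
      apply List.find?_isSome.mpr
      exact ⟨w0, hw0S, by simpa using hs0⟩
    obtain ⟨w1, hw1⟩ := Option.isSome_iff_exists.mp hsome
    have hw1mem : w1 ∈ word_list := hmemS w1 (List.mem_of_find?_eq_some hw1)
    have hw1slot : pvSlot n (pvWid word_dict w1) = j := by
      have := List.find?_some hw1
      simpa using this
    rw [hw1, Option.map_some]
    simp only [List.getD_eq_getElem?_getD]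
    have : word_list.countP (fun w => pvSlot n (pvWid word_dict w) == j) =
        word_list.count w1 := by
      rw [List.count]
      apply List.countP_congr
      intro x hx
      simp only [beq_iff_eq]
      constructor
      · intro hxs; exact hinj x hx w1 hw1mem (hxs.trans hw1slot.symm)
      · intro hxe; exact hxe ▸ hw1slot
    rw [this]
    simp [hjn]
  · have hnone : (PySem.Set.ofList word_list).find?
        ((fun p => pvSlot n (pvWid word_dict p.1) == j) ∘ (fun k => (k, (word_list.count k : Int)))) = none := by
      rw [List.find?_eq_none]
      intro w hw
      simp only [Function.comp, beq_iff_eq]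
      exact fun hh => hex ⟨w, hmemS w hw, hh⟩
    have hcount : word_list.countP (fun w => pvSlot n (pvWid word_dict w) == j) = 0 := by
      rw [List.countP_eq_zero]
      intro w hw
      simp only [beq_iff_eq]
      exact fun hh => hex ⟨w, hw, hh⟩
    rw [hnone, hcount]
    simp
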